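-- pv_equiv track=rewrite | github.com/Pehlevan-Group/incontext-asymptotics-experiments | Nonlinear/experiment/remote/Fig5/resultsdump/earlystop.py | find_increase_start_index
-- ===== SOURCE A (Python) =====
-- def find_increase_start_index(arr, tolerance=1, consistency=3):
--     # Tolerance: maximum allowed increase for it to be considered "not too much"
--     # Consistency: number of consecutive increases needed to consider it a trend
--     increasing_streak = 0
--
--     for i in range(1, len(arr)):
--         difference = arr[i] - arr[i - 1]
--
--         if difference > tolerance:
--             increasing_streak += 1
--         else:
--             increasing_streak = 0
--
--         if increasing_streak >= consistency:
--             return i - consistency + 1  # Return the starting index of the consistent increase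
--
--     return -1  # Return -1 if no consistent increase is found
-- ===== SOURCE B (Python) =====
-- def find_increase_start_index(arr, tolerance=1, consistency=3):
--     n = len(arr)
--     # adjacent-difference flags: flags[j] == True iff arr[j+1] - arr[j] > tolerance
--     flags = [arr[j + 1] - arr[j] > tolerance for j in range(n - 1)]
--     # the trend ends at position i when the `consistency` flags before i are all True
--     for i in range(max(consistency, 1), n):
--         if all(flags[i - consistency:i]):
--             return i - consistency + 1
--     return -1
-- ===== Notes on version B (the rewrite author's own statement) =====
-- stated objective: alternative
-- what changed: B precomputes the adjacent-difference flag table and finds the first position whose trailing window of `consistency` flags is all True (a slice + all check), instead of A's inline streak counter with reset and early exit.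
import Mathlib
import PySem

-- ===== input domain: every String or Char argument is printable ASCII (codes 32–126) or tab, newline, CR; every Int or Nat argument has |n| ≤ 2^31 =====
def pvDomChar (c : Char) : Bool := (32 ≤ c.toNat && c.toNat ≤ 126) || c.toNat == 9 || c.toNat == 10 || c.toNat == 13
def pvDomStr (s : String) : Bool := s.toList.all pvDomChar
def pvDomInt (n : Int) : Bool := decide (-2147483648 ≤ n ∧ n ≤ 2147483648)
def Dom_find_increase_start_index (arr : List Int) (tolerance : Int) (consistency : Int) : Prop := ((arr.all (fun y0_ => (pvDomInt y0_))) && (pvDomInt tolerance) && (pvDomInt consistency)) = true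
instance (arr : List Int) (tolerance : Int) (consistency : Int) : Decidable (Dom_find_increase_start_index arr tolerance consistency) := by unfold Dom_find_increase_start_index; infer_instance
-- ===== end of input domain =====

-- B replaces A's inline streak counter by a precomputed adjacent-difference flag table
-- scanned with a sliding all-True window (objective: alternative decomposition, same result).

-- ===== PORT A =====
-- A's for-loop over range(1, len(arr)): state = increasing_streak; early return on streak ≥ consistency
def find_increase_start_index_loop (arr : List Int) (tolerance : Int) (consistency : Int)
    (streak : Int) (i : Nat) : Int :=
  if i < arr.length then
    -- difference = arr[i] - arr[i-1]; both indices are in range here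
    if (if (PySem.List.pyGet? arr (i : Int)).getD 0 -
           (PySem.List.pyGet? arr ((i : Int) - 1)).getD 0 > tolerance
        then streak + 1 else 0) ≥ consistency then
      (i : Int) - consistency + 1
    else
      find_increase_start_index_loop arr tolerance consistency
        (if (PySem.List.pyGet? arr (i : Int)).getD 0 -
            (PySem.List.pyGet? arr ((i : Int) - 1)).getD 0 > tolerance
         then streak + 1 else 0) (i + 1)
  else -1
termination_by arr.length - i

def find_increase_start_index (arr : List Int) (tolerance : Int) (consistency : Int) : Int :=
  find_increase_start_index_loop arr tolerance consistency 0 1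

-- ===== PORT B =====
-- flags = [arr[j+1] - arr[j] > tolerance for j in range(n - 1)]
def pvAltFlags (arr : List Int) (tolerance : Int) : List Bool :=
  (List.range (arr.length - 1)).map (fun (j : Nat) =>
    decide ((PySem.List.pyGet? arr ((j : Int) + 1)).getD 0 -
            (PySem.List.pyGet? arr (j : Int)).getD 0 > tolerance))

-- for i in range(max(consistency, 1), n): if all(flags[i-consistency:i]): return i-consistency+1
def pvAltLoop (flags : List Bool) (consistency : Int) (n : Nat) (i : Nat) : Int :=
  if i < n then
    if (PySem.List.slice flags (some ((i : Int) - consistency)) (some (i : Int))).all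
        (fun b => b) then
      (i : Int) - consistency + 1
    else pvAltLoop flags consistency n (i + 1)
  else -1
termination_by n - i

def find_increase_start_index_alt (arr : List Int) (tolerance : Int) (consistency : Int) : Int :=
  pvAltLoop (pvAltFlags arr tolerance) consistency arr.length (max consistency 1).toNat

-- ===== PRECONDITION & SPEC =====
def Spec_find_increase_start_index (arr : List Int) (tolerance : Int) (consistency : Int) (out : Int) : Prop := out = find_increase_start_index_alt arr tolerance consistency
instance (arr : List Int) (tolerance : Int) (consistency : Int) (out : Int) : Decidable (Spec_find_increase_start_index arr tolerance consistency out) := by unfold Spec_find_increase_start_index; infer_instance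

-- ===== CLAIM (what is proved, stated in full; the proofs are below) =====
def Claim_equal_find_increase_start_index : Prop := ∀ (arr : List Int) (tolerance : Int) (consistency : Int), Dom_find_increase_start_index arr tolerance consistency → Spec_find_increase_start_index arr tolerance consistency (find_increase_start_index arr tolerance consistency)

-- ===== LEMMAS AND PROOFS =====

-- length of the trailing all-true suffix of a flag list (= A's streak value)
def pvTrail (l : List Bool) : Int := l.foldl (fun s b => if b then s + 1 else 0) 0

theorem pvTrail_append (l : List Bool) (b : Bool) :
    pvTrail (l ++ [b]) = if b then pvTrail l + 1 else 0 := by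
  simp [pvTrail, List.foldl_append]

theorem pvTrail_bounds (l : List Bool) : 0 ≤ pvTrail l ∧ pvTrail l ≤ l.length := by
  induction l using List.reverseRecOn with
  | nil => simp [pvTrail]
  | append_singleton l b ih =>
      rw [pvTrail_append]
      rcases b <;> simp <;> omega

-- trailing run has length ≥ k  ↔  the last k flags are all true
theorem pvTrail_ge_iff (l : List Bool) (k : Nat) (hk : k ≤ l.length) :
    ((k : Int) ≤ pvTrail l) ↔ (l.drop (l.length - k)).all (fun b => b) = true := by
  induction l using List.reverseRecOn generalizing k with
  | nil =>
      have hk0 : k = 0 := by simpa using hk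
      subst hk0; simp [pvTrail]
  | append_singleton l b ih =>
      cases k with
      | zero => simpa using (pvTrail_bounds (l ++ [b])).1
      | succ k =>
          have hk' : k ≤ l.length := by simp at hk; omega
          have hdrop : (l ++ [b]).drop ((l ++ [b]).length - (k + 1)) =
              l.drop (l.length - k) ++ [b] := by
            rw [show (l ++ [b]).length - (k + 1) = l.length - k by simp,
                List.drop_append_of_le_length (by omega)]
          rw [hdrop, pvTrail_append]
          cases b with
          | false =>
              rw [if_neg (by simp), show ((l.drop (l.length - k) ++ [false]).all
                    fun b => b) = false from by simp]
              simp
          | true =>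
              rw [if_pos rfl, show ((l.drop (l.length - k) ++ [true]).all fun b => b) =
                    ((l.drop (l.length - k)).all fun b => b) from by simp,
                  ← ih k hk']
              push_cast
              omega

theorem pvAltFlags_length (arr : List Int) (tolerance : Int) :
    (pvAltFlags arr tolerance).length = arr.length - 1 := by
  simp [pvAltFlags]

-- the flag table evaluated at an in-range index
theorem pvAltFlags_get (arr : List Int) (tolerance : Int) (j : Nat) (hj : j < arr.length - 1) :
    (pvAltFlags arr tolerance)[j]'(by simp [pvAltFlags]; omega) =
      decide (arr[j + 1]'(by omega) - arr[j]'(by omega) > tolerance) := by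
  have e1 : (PySem.List.pyGet? arr ((j : Int) + 1)).getD 0 = arr[j + 1]'(by omega) := by
    rw [show ((j : Int) + 1) = ((j + 1 : Nat) : Int) by push_cast; ring,
        PySem.List.pyGet?_natCast, List.getElem?_eq_getElem (by omega)]
    rfl
  have e2 : (PySem.List.pyGet? arr ((j : Int))).getD 0 = arr[j]'(by omega) := by
    rw [PySem.List.pyGet?_natCast, List.getElem?_eq_getElem (by omega)]
    rfl
  unfold pvAltFlags
  rw [List.getElem_map, List.getElem_range, e1, e2]

-- streak update: A's new streak at step i equals pvTrail of the first i flags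
theorem pvStreak_step (arr : List Int) (tolerance : Int) (i : Nat)
    (h1 : 1 ≤ i) (h2 : i < arr.length) (streak : Int)
    (hs : streak = pvTrail ((pvAltFlags arr tolerance).take (i - 1))) :
    (if (PySem.List.pyGet? arr (i : Int)).getD 0 -
        (PySem.List.pyGet? arr ((i : Int) - 1)).getD 0 > tolerance
     then streak + 1 else 0) =
    pvTrail ((pvAltFlags arr tolerance).take i) := by
  have hlen := pvAltFlags_length arr tolerance
  have htake : (pvAltFlags arr tolerance).take i =
      (pvAltFlags arr tolerance).take (i - 1) ++
        [(pvAltFlags arr tolerance)[i - 1]'(by omega)] := by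
    conv_lhs => rw [show i = (i - 1) + 1 from by omega]
    rw [List.take_add_one, List.getElem?_eq_getElem (by omega)]
    simp
  rw [htake, pvTrail_append, pvAltFlags_get arr tolerance (i - 1) (by omega)]
  have eI : (PySem.List.pyGet? arr (i : Int)).getD 0 = arr[i]'h2 := by
    rw [PySem.List.pyGet?_natCast, List.getElem?_eq_getElem h2]
    rfl
  have eIm : (PySem.List.pyGet? arr ((i : Int) - 1)).getD 0 = arr[i - 1]'(by omega) := by
    rw [show ((i : Int) - 1) = ((i - 1 : Nat) : Int) from by push_cast [h1]; ring,
        PySem.List.pyGet?_natCast, List.getElem?_eq_getElem (by omega)]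
    rfl
  rw [eI, eIm, hs]
  simp [show i - 1 + 1 = i from by omega]

-- main loop correspondence for i ≥ max(consistency, 1)
theorem pv_main (arr : List Int) (tolerance consistency : Int) (i : Nat)
    (hi : (max consistency 1).toNat ≤ i) (h1 : 1 ≤ i) :
    find_increase_start_index_loop arr tolerance consistency
      (pvTrail ((pvAltFlags arr tolerance).take (i - 1))) i =
    pvAltLoop (pvAltFlags arr tolerance) consistency arr.length i := by
  have hlen := pvAltFlags_length arr tolerance
  by_cases h : i < arr.length
  · rw [find_increase_start_index_loop, pvAltLoop, if_pos h, if_pos h,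
        pvStreak_step arr tolerance i h1 h _ rfl]
    have hcond : ((PySem.List.slice (pvAltFlags arr tolerance)
          (some ((i : Int) - consistency)) (some (i : Int))).all (fun b => b) = true) ↔
        (consistency ≤ pvTrail ((pvAltFlags arr tolerance).take i)) := by
      by_cases hc : 0 < consistency
      · have hm : max consistency 1 = consistency := max_eq_left (by omega)
        rw [hm] at hi
        have hci : consistency.toNat ≤ i := by omega
        have h0 : (0 : Int) ≤ (i : Int) - consistency := by omega
        rw [PySem.List.slice_toNat _ h0 (by positivity)]
        have hsl : ((pvAltFlags arr tolerance).take i).drop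
              (((pvAltFlags arr tolerance).take i).length - consistency.toNat) =
            ((pvAltFlags arr tolerance).drop ((i : Int) - consistency).toNat).take
              ((i : Int).toNat - ((i : Int) - consistency).toNat) := by
          rw [List.drop_take]
          congr 1
          · simp; omega
          · congr 1; simp; omega
        rw [← hsl, ← pvTrail_ge_iff _ consistency.toNat (by simp; omega),
            Int.toNat_of_nonneg (by omega)]
      · have h0 : (0 : Int) ≤ (i : Int) - consistency := by omega
        rw [PySem.List.slice_toNat _ h0 (by positivity),
            show (i : Int).toNat - ((i : Int) - consistency).toNat = 0 from by omega]
        have hb := pvTrail_bounds ((pvAltFlags arr tolerance).take i)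
        simp; omega
    by_cases hret : consistency ≤ pvTrail ((pvAltFlags arr tolerance).take i)
    · rw [if_pos hret, if_pos (hcond.mpr hret)]
    · rw [if_neg hret, if_neg (by rw [hcond]; exact hret)]
      have hrec := pv_main arr tolerance consistency (i + 1) (by omega) (by omega)
      simpa using hrec
  · rw [find_increase_start_index_loop, pvAltLoop, if_neg h, if_neg h]
termination_by arr.length - i
decreasing_by omega

-- prelude: A's iterations before i = max(consistency, 1) can never return
theorem pv_prelude (arr : List Int) (tolerance consistency : Int) (i : Nat)
    (h1 : 1 ≤ i) (hi : i ≤ (max consistency 1).toNat) :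
    find_increase_start_index_loop arr tolerance consistency
      (pvTrail ((pvAltFlags arr tolerance).take (i - 1))) i =
    pvAltLoop (pvAltFlags arr tolerance) consistency arr.length (max consistency 1).toNat := by
  by_cases heq : i = (max consistency 1).toNat
  · subst heq; exact pv_main arr tolerance consistency _ le_rfl h1
  · have hlt : i < (max consistency 1).toNat := by omega
    have hic : (i : Int) < consistency := by
      by_cases hc : consistency ≤ 1
      · rw [max_eq_right hc] at hlt; omega
      · rw [max_eq_left (by omega)] at hlt; omega
    by_cases h : i < arr.length
    · rw [find_increase_start_index_loop, if_pos h,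
          pvStreak_step arr tolerance i h1 h _ rfl]
      have hb := pvTrail_bounds ((pvAltFlags arr tolerance).take i)
      have hlen2 : ((pvAltFlags arr tolerance).take i).length ≤ i := by simp
      rw [if_neg (by omega)]
      have hrec := pv_prelude arr tolerance consistency (i + 1) (by omega) (by omega)
      simpa using hrec
    · rw [find_increase_start_index_loop, pvAltLoop, if_neg h, if_neg (by omega)]
termination_by (max consistency 1).toNat - i
decreasing_by omega

-- ===== VERDICT (by name: the statement is the Claim_ definition above) =====
theorem find_increase_start_index_spec : Claim_equal_find_increase_start_index := by
  intro arr tolerance consistency _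
  unfold Spec_find_increase_start_index find_increase_start_index find_increase_start_index_alt
  have h := pv_prelude arr tolerance consistency 1 le_rfl
    (by exact Int.toNat_le_toNat (le_max_right consistency 1))
  simpa [pvTrail] using h
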